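-- pv_equiv track=rewrite | github.com/gqqnbig/Banzhaf | BanzhafWithJunior.py | _findWinningCoalitionsCore
-- ===== SOURCE A (Python) =====
-- def _findWinningCoalitionsCore(juniorIndex: int, quota: int, weights, consumeIndex: int):
-- 	coalitions = []
--
-- 	while consumeIndex < len(weights):
-- 		head = [consumeIndex]
--
-- 		if consumeIndex == juniorIndex:
-- 			if weights[consumeIndex] > quota:
-- 				coalitions += [head]
-- 			tail = _findWinningCoalitionsCore(juniorIndex, quota - weights[consumeIndex] + 1, weights, consumeIndex + 1)
-- 		else:
-- 			if weights[consumeIndex] >= quota: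
-- 				coalitions += [head]
-- 			tail = _findWinningCoalitionsCore(juniorIndex, quota - weights[consumeIndex], weights, consumeIndex + 1)
--
-- 		coalitions += [head + c for c in tail]
--
-- 		consumeIndex += 1
--
-- 	return coalitions
-- ===== SOURCE B (Python) =====
-- def _findWinningCoalitionsCore(juniorIndex: int, quota: int, weights, consumeIndex: int):
-- 	# Pure binary include/exclude recursion instead of A's while-loop with accumulator.
-- 	if consumeIndex >= len(weights):
-- 		return []
-- 	w = weights[consumeIndex]
-- 	if consumeIndex == juniorIndex:
-- 		wins, newQuota = w > quota, quota - w + 1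
-- 	else:
-- 		wins, newQuota = w >= quota, quota - w
-- 	include = ([[consumeIndex]] if wins else []) \
-- 		+ [[consumeIndex] + c for c in _findWinningCoalitionsCore(juniorIndex, newQuota, weights, consumeIndex + 1)]
-- 	return include + _findWinningCoalitionsCore(juniorIndex, quota, weights, consumeIndex + 1)
-- ===== Notes on version B (the rewrite author's own statement) =====
-- stated objective: alternative
-- what changed: Replaced A's while-loop that accumulates a coalitions list (with the recursive call embedded in each iteration) by a pure binary include/exclude recursion on the index that returns include-branch results (singleton, then extended tails) followed by the exclude-branch recursion, with no loop and no accumulator.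
import Mathlib
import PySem

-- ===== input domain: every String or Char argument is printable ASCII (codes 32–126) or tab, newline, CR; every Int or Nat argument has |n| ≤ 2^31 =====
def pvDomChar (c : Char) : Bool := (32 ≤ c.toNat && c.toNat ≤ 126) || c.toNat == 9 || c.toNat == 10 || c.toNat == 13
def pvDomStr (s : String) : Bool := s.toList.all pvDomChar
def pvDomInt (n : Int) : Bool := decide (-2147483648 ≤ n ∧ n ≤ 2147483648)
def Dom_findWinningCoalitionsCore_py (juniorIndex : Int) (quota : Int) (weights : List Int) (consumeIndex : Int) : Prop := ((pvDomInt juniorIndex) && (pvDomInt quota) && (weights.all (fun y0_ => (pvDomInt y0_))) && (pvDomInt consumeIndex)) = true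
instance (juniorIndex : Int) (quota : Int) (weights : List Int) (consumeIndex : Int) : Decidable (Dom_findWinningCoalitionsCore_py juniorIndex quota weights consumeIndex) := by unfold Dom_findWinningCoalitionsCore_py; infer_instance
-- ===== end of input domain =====

-- B replaces A's while-loop-with-accumulator by a pure include/exclude binary recursion; same cost, different decomposition (objective: alternative).

-- ===== PORT A =====
-- A's while loop, as tail recursion over its state (coalitions, consumeIndex); the
-- recursive call '_findWinningCoalitionsCore(..., consumeIndex+1)' is 'goA ... []'.
-- weights[consumeIndex] is PySem.List.pyGet? (Python negative-index rule); the
-- .getD 0 default is reached only outside Pre_ (where the Python raises IndexError).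
def goA (juniorIndex quota : Int) (weights : List Int) (consumeIndex : Int)
    (coalitions : List (List Int)) : List (List Int) :=
  if _h : consumeIndex < (weights.length : Int) then
    let wi := (PySem.List.pyGet? weights consumeIndex).getD 0
    let head : List Int := [consumeIndex]
    if consumeIndex = juniorIndex then
      let coalitions1 := if wi > quota then coalitions ++ [head] else coalitions
      let tail := goA juniorIndex (quota - wi + 1) weights (consumeIndex + 1) []
      goA juniorIndex quota weights (consumeIndex + 1)
        (coalitions1 ++ tail.map (fun c => head ++ c))
    else
      let coalitions1 := if wi ≥ quota then coalitions ++ [head] else coalitions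
      let tail := goA juniorIndex (quota - wi) weights (consumeIndex + 1) []
      goA juniorIndex quota weights (consumeIndex + 1)
        (coalitions1 ++ tail.map (fun c => head ++ c))
  else coalitions
termination_by ((weights.length : Int) - consumeIndex).toNat
decreasing_by all_goals (simp; omega)

def findWinningCoalitionsCore_py (juniorIndex : Int) (quota : Int) (weights : List Int) (consumeIndex : Int) : List (List Int) :=
  goA juniorIndex quota weights consumeIndex []

-- ===== PORT B =====
def findWinningCoalitionsCore_py_alt (juniorIndex : Int) (quota : Int) (weights : List Int) (consumeIndex : Int) : List (List Int) :=
  if _h : (weights.length : Int) ≤ consumeIndex then []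
  else
    let w := (PySem.List.pyGet? weights consumeIndex).getD 0
    let wins : Bool := if consumeIndex = juniorIndex then decide (w > quota) else decide (w ≥ quota)
    let newQuota := if consumeIndex = juniorIndex then quota - w + 1 else quota - w
    let include_ := (if wins then [[consumeIndex]] else [])
      ++ (findWinningCoalitionsCore_py_alt juniorIndex newQuota weights (consumeIndex + 1)).map (fun c => [consumeIndex] ++ c)
    include_ ++ findWinningCoalitionsCore_py_alt juniorIndex quota weights (consumeIndex + 1)
termination_by ((weights.length : Int) - consumeIndex).toNat
decreasing_by all_goals (simp; omega)

-- ===== PRECONDITION & SPEC =====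
-- Pre_ excludes exactly the inputs where the Python A raises IndexError
-- (consumeIndex below -len(weights): weights[consumeIndex] is out of range); B raises there too.
def Pre_findWinningCoalitionsCore_py (juniorIndex : Int) (quota : Int) (weights : List Int) (consumeIndex : Int) : Prop :=
  -(weights.length : Int) ≤ consumeIndex
instance (juniorIndex : Int) (quota : Int) (weights : List Int) (consumeIndex : Int) : Decidable (Pre_findWinningCoalitionsCore_py juniorIndex quota weights consumeIndex) := by unfold Pre_findWinningCoalitionsCore_py; infer_instance

def pvWitness_findWinningCoalitionsCore_py : Int × Int × List Int × Int := (0, 3, [2, 2, 1], 0)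

def Spec_findWinningCoalitionsCore_py (juniorIndex : Int) (quota : Int) (weights : List Int) (consumeIndex : Int) (out : List (List Int)) : Prop := out = findWinningCoalitionsCore_py_alt juniorIndex quota weights consumeIndex
instance (juniorIndex : Int) (quota : Int) (weights : List Int) (consumeIndex : Int) (out : List (List Int)) : Decidable (Spec_findWinningCoalitionsCore_py juniorIndex quota weights consumeIndex out) := by unfold Spec_findWinningCoalitionsCore_py; infer_instance

-- ===== CLAIM (what is proved, stated in full; the proofs are below) =====
def Claim_equal_findWinningCoalitionsCore_py : Prop := ∀ (juniorIndex : Int) (quota : Int) (weights : List Int) (consumeIndex : Int), Dom_findWinningCoalitionsCore_py juniorIndex quota weights consumeIndex → Pre_findWinningCoalitionsCore_py juniorIndex quota weights consumeIndex → Spec_findWinningCoalitionsCore_py juniorIndex quota weights consumeIndex (findWinningCoalitionsCore_py juniorIndex quota weights consumeIndex)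

-- ===== LEMMAS AND PROOFS =====
lemma goA_eq_alt : ∀ (n : ℕ) (juniorIndex quota : Int) (weights : List Int) (consumeIndex : Int)
    (acc : List (List Int)), ((weights.length : Int) - consumeIndex).toNat ≤ n →
    goA juniorIndex quota weights consumeIndex acc
      = acc ++ findWinningCoalitionsCore_py_alt juniorIndex quota weights consumeIndex := by
  intro n
  induction n with
  | zero =>
    intro j q w ci acc h
    have hci : ¬ ci < (w.length : Int) := by omega
    rw [goA, findWinningCoalitionsCore_py_alt]
    simp [hci, (by omega : (w.length : Int) ≤ ci)]
  | succ n ih =>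
    intro j q w ci acc h
    by_cases hci : ci < (w.length : Int)
    · have hm : ((w.length : Int) - (ci + 1)).toNat ≤ n := by omega
      have hle : ¬ (w.length : Int) ≤ ci := by omega
      have ih1 : ∀ (q' : Int) (acc' : List (List Int)),
          goA j q' w (ci + 1) acc'
            = acc' ++ findWinningCoalitionsCore_py_alt j q' w (ci + 1) :=
        fun q' acc' => ih j q' w (ci + 1) acc' hm
      rw [goA, findWinningCoalitionsCore_py_alt]
      simp only [dif_pos hci, dif_neg hle]
      by_cases hj : ci = j
      · subst hj
        by_cases hw : ((PySem.List.pyGet? w ci).getD 0) > q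
        · simp [hw, ih1, List.append_assoc]
        · simp [hw, ih1, List.append_assoc]
      · by_cases hw : ((PySem.List.pyGet? w ci).getD 0) ≥ q
        · simp [hj, hw, ih1, List.append_assoc]
        · simp [hj, hw, ih1, List.append_assoc]
    · rw [goA, findWinningCoalitionsCore_py_alt]
      simp [hci, (by omega : (w.length : Int) ≤ ci)]

-- ===== VERDICT (by name: the statement is the Claim_ definition above) =====
theorem findWinningCoalitionsCore_py_spec : Claim_equal_findWinningCoalitionsCore_py := by
  intro j q w ci _ _
  unfold Spec_findWinningCoalitionsCore_py findWinningCoalitionsCore_py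
  simpa using goA_eq_alt ((w.length : Int) - ci).toNat j q w ci [] le_rfl
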